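-- pv_equiv track=rewrite | github.com/1brahimmohamed/Algorithms-in-Medicine | Assignment 8/Longest Common Substring/common_substring.py | hash_dictionary
-- ===== SOURCE A (Python) =====
-- def polynomial_hash_func(string, prime, multiplier):
--     # initialize hash value for 'string'
--     hash_value = 0
--
--     # loop through each character of 'string' to get the overall hash value
--     for i in range(len(string) - 1, -1, -1):
--         hash_value = (hash_value * multiplier + ord(string[i])) % prime
--     return hash_value
--
-- def hash_dictionary(string, p_len, prime, multiplier):
--     dics = {}
--     substring = string[len(string) - p_len:]
--     last = polynomial_hash_func(substring, prime, multiplier)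
--     dics[last] = len(string) - p_len
--     y = pow(multiplier, p_len, prime)
--     for j in range(len(string) - p_len - 1, - 1, - 1):
--         current = (multiplier * last + ord(string[j]) - y * ord(string[j + p_len])) % prime
--         dics[current] = j
--         last = current
--     return dics
-- ===== SOURCE B (Python) =====
-- def hash_dictionary(string, p_len, prime, multiplier):
--     # Hash every window from scratch with a forward Horner scan
--     # (h = sum of ord(c) * multiplier**i mod prime) instead of rolling.
--     def window_hash(sub):
--         h = 0
--         power = 1
--         for c in sub:
--             h = (h + ord(c) * power) % prime
--             power = (power * multiplier) % prime
--         return h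
--
--     n = len(string)
--     dics = {window_hash(string[n - p_len:]): n - p_len}
--     for j in range(n - p_len - 1, -1, -1):
--         dics[window_hash(string[j:j + p_len])] = j
--     return dics
-- ===== Notes on version B (the rewrite author's own statement) =====
-- stated objective: alternative
-- what changed: Every window's hash is recomputed from scratch with a forward Horner scan (running power of the multiplier) instead of A's rolling-hash recurrence with its reverse-Horner helper and modular pow; B trades A's O(n+p) time for O(n*p) in exchange for one self-contained window_hash helper. Pre_ excludes only inputs where A raises (negative p_len, prime = 0).
import Mathlib
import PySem

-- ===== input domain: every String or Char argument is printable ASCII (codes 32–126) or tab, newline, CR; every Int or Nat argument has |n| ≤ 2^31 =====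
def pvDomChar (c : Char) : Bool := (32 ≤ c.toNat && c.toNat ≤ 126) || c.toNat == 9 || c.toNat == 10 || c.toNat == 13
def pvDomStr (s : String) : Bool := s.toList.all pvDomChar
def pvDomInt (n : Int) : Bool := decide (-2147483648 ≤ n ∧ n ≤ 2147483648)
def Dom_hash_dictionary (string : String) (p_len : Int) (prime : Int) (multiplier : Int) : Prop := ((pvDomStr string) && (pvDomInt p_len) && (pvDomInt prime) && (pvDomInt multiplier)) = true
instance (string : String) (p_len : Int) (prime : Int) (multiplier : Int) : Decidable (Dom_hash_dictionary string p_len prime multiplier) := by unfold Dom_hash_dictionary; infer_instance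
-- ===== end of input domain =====

-- B replaces the rolling-hash recurrence (reverse-Horner helper, modular pow, O(1) update)
-- by recomputing every window's hash from scratch with a forward Horner scan; equal return
-- value on all of Pre_ (A raises outside it).


def pvOrd (c : Char) : Int := (c.toNat : Int)

-- hand-ported fast modular exponentiation: equals Python's pow(b, e, n) for e ≥ 0 and
-- n ≠ 0 (PySem.Int.powMod's closed form 'mod (b^e) n' is not evaluable for huge e;
-- exactness is pvPowMod_eq below)
def pvPowMod (b : Int) (e : Nat) (n : Int) : Int :=
  if h : e = 0 then PySem.Int.mod 1 n
  else
    let half := pvPowMod b (e / 2) n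
    let sq := PySem.Int.mod (half * half) n
    if e % 2 = 0 then sq else PySem.Int.mod (sq * b) n
termination_by e
decreasing_by exact Nat.div_lt_self (Nat.pos_of_ne_zero h) (by norm_num)

-- ===== PORT A =====
-- A's helper, over the character list of its string argument
def polynomial_hash_func (t : List Char) (prime : Int) (multiplier : Int) : Int :=
  (PySem.List.pyRange (PySem.List.len t - 1) (-1) (-1)).foldl
    (fun hash_value i =>
      PySem.Int.mod (hash_value * multiplier + pvOrd (PySem.List.pyGetD t i ' ')) prime) 0

def hash_dictionary (string : String) (p_len : Int) (prime : Int) (multiplier : Int) : List (Int × Int) :=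
  let s := string.toList
  let substring := PySem.List.slice s (some (PySem.List.len s - p_len)) none
  let last := polynomial_hash_func substring prime multiplier
  let dics := (PySem.Dict.empty : PySem.Dict Int Int).insert last (PySem.List.len s - p_len)
  -- pow(multiplier, p_len, prime); p_len ≥ 0 on all of Pre_
  let y := pvPowMod multiplier p_len.toNat prime
  ((PySem.List.pyRange (PySem.List.len s - p_len - 1) (-1) (-1)).foldl
    (fun st j =>
      let current := PySem.Int.mod
        (multiplier * st.2 + pvOrd (PySem.List.pyGetD s j ' ')
          - y * pvOrd (PySem.List.pyGetD s (j + p_len) ' ')) prime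
      (st.1.insert current j, current)) (dics, last)).1.items

-- ===== PORT B =====
-- Source B's inner for-loop: forward Horner with a running power of the multiplier
def pvWindowHash (t : List Char) (prime : Int) (multiplier : Int) : Int :=
  (t.foldl
    (fun st c =>
      (PySem.Int.mod (st.1 + pvOrd c * st.2) prime, PySem.Int.mod (st.2 * multiplier) prime))
    (0, 1)).1

def hash_dictionary_alt (string : String) (p_len : Int) (prime : Int) (multiplier : Int) : List (Int × Int) :=
  let s := string.toList
  let n := PySem.List.len s
  let dics := (PySem.Dict.empty : PySem.Dict Int Int).insert
    (pvWindowHash (PySem.List.slice s (some (n - p_len)) none) prime multiplier) (n - p_len)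
  ((PySem.List.pyRange (n - p_len - 1) (-1) (-1)).foldl
    (fun dics j =>
      dics.insert (pvWindowHash (PySem.List.slice s (some j) (some (j + p_len))) prime multiplier) j)
    dics).items

-- ===== PRECONDITION & SPEC =====
-- Pre_ excludes exactly the inputs where the Python A raises: p_len < 0 (IndexError /
-- ValueError) and prime = 0 (ZeroDivisionError / ValueError in pow).
def Pre_hash_dictionary (string : String) (p_len : Int) (prime : Int) (multiplier : Int) : Prop :=
  0 ≤ p_len ∧ prime ≠ 0

instance (string : String) (p_len : Int) (prime : Int) (multiplier : Int) : Decidable (Pre_hash_dictionary string p_len prime multiplier) := by unfold Pre_hash_dictionary; infer_instance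

def pvWitness_hash_dictionary : String × Int × Int × Int := ("ab", 1, 7, 3)

def Spec_hash_dictionary (string : String) (p_len : Int) (prime : Int) (multiplier : Int) (out : List (Int × Int)) : Prop := out = hash_dictionary_alt string p_len prime multiplier
instance (string : String) (p_len : Int) (prime : Int) (multiplier : Int) (out : List (Int × Int)) : Decidable (Spec_hash_dictionary string p_len prime multiplier out) := by unfold Spec_hash_dictionary; infer_instance

-- ===== CLAIM (what is proved, stated in full; the proofs are below) =====
def Claim_equal_hash_dictionary : Prop := ∀ (string : String) (p_len : Int) (prime : Int) (multiplier : Int), Dom_hash_dictionary string p_len prime multiplier → Pre_hash_dictionary string p_len prime multiplier → Spec_hash_dictionary string p_len prime multiplier (hash_dictionary string p_len prime multiplier)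

-- ===== LEMMAS AND PROOFS =====

-- the integer polynomial value Σ ord(t[i]) * m^i of a character list (Horner form)
def polyVal (m : Int) (t : List Char) : Int :=
  t.foldr (fun c acc => acc * m + pvOrd c) 0

@[simp] lemma polyVal_nil (m : Int) : polyVal m [] = 0 := rfl
@[simp] lemma polyVal_cons (m : Int) (c : Char) (t : List Char) :
    polyVal m (c :: t) = polyVal m t * m + pvOrd c := rfl

lemma polyVal_append_singleton (m : Int) (t : List Char) (x : Char) :
    polyVal m (t ++ [x]) = polyVal m t + pvOrd x * m ^ t.length := by
  induction t with
  | nil => simp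
  | cons c t ih => simp [ih]; ring

lemma pv_dvd_mod_sub (n a : Int) : n ∣ (PySem.Int.mod a n - a) := by
  refine ⟨-(PySem.Int.floordiv a n), ?_⟩
  have h := PySem.Int.floordiv_mul_add_mod a n
  linarith [h]

lemma pv_mod_unique (n a r : Int) (hn : n ≠ 0) (hd : n ∣ (a - r))
    (hb : (0 < n → 0 ≤ r ∧ r < n) ∧ (n < 0 → n < r ∧ r ≤ 0)) :
    PySem.Int.mod a n = r := by
  have h1 := pv_dvd_mod_sub n a
  have hdr : n ∣ (PySem.Int.mod a n - r) := by
    have := dvd_add h1 hd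
    simpa [sub_add_sub_cancel] using this
  have hz : PySem.Int.mod a n - r = 0 := by
    apply Int.eq_zero_of_dvd_of_natAbs_lt_natAbs hdr
    rcases lt_trichotomy n 0 with hlt | heq | hgt
    · have hb1 := hb.2 hlt
      have hm := PySem.Int.mod_neg_bounds a hlt
      omega
    · exact absurd heq hn
    · have hb1 := hb.1 hgt
      have hm1 := PySem.Int.mod_nonneg a hgt
      have hm2 := PySem.Int.mod_lt a hgt
      omega
  omega

lemma pv_mod_zero (n : Int) (hn : n ≠ 0) : PySem.Int.mod 0 n = 0 := by
  apply pv_mod_unique n 0 0 hn ⟨0, by ring⟩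
  constructor <;> intro h <;> omega

lemma pv_mod_bounds (n a : Int) :
    (0 < n → 0 ≤ PySem.Int.mod a n ∧ PySem.Int.mod a n < n) ∧
    (n < 0 → n < PySem.Int.mod a n ∧ PySem.Int.mod a n ≤ 0) := by
  constructor <;> intro h
  · exact ⟨PySem.Int.mod_nonneg a h, PySem.Int.mod_lt a h⟩
  · exact PySem.Int.mod_neg_bounds a h

lemma pv_mod_congr (n a b : Int) (hn : n ≠ 0) (hd : n ∣ (a - b)) :
    PySem.Int.mod a n = PySem.Int.mod b n := by
  apply pv_mod_unique n a (PySem.Int.mod b n) hn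
  · obtain ⟨k1, e1⟩ := hd
    obtain ⟨k2, e2⟩ := pv_dvd_mod_sub n b
    exact ⟨k1 - k2, by linarith⟩
  · exact pv_mod_bounds n b

lemma pv_mod_idem (n a : Int) (hn : n ≠ 0) :
    PySem.Int.mod (PySem.Int.mod a n) n = PySem.Int.mod a n := by
  exact pv_mod_unique n _ _ hn ⟨0, by ring⟩ (pv_mod_bounds n a)

lemma pvPowMod_eq (b n : Int) (hn : n ≠ 0) : ∀ e : Nat, pvPowMod b e n = PySem.Int.mod (b ^ e) n := by
  intro e
  induction e using Nat.strong_induction_on with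
  | _ e ih =>
    rw [pvPowMod]
    by_cases h : e = 0
    · simp [h]
    · rw [dif_neg h]
      have hhalf := ih (e / 2) (Nat.div_lt_self (Nat.pos_of_ne_zero h) (by norm_num))
      have hsq : PySem.Int.mod (pvPowMod b (e / 2) n * pvPowMod b (e / 2) n) n
          = PySem.Int.mod (b ^ (e / 2 + e / 2)) n := by
        rw [hhalf, pow_add]
        apply pv_mod_congr n _ _ hn
        obtain ⟨k, ek⟩ := pv_dvd_mod_sub n (b ^ (e / 2))
        exact ⟨k * (PySem.Int.mod (b ^ (e / 2)) n + b ^ (e / 2)),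
          by linear_combination (PySem.Int.mod (b ^ (e / 2)) n + b ^ (e / 2)) * ek⟩
      by_cases hpar : e % 2 = 0
      · rw [if_pos hpar, hsq]
        congr 1
        congr 1
        omega
      · rw [if_neg hpar, hsq]
        have he : e = (e / 2 + e / 2) + 1 := by omega
        rw [show b ^ e = b ^ (e / 2 + e / 2) * b by
          conv_lhs => rw [he]
          rw [pow_succ]]
        apply pv_mod_congr n _ _ hn
        obtain ⟨k, ek⟩ := pv_dvd_mod_sub n (b ^ (e / 2 + e / 2))
        exact ⟨k * b, by linear_combination b * ek⟩

-- A's helper as a foldr over the characters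
lemma polyA_foldr (pr m : Int) (hpr : pr ≠ 0) (t : List Char) :
    t.foldr (fun c h => PySem.Int.mod (h * m + pvOrd c) pr) 0 = PySem.Int.mod (polyVal m t) pr := by
  induction t with
  | nil => simp [pv_mod_zero pr hpr]
  | cons c t ih =>
    simp only [List.foldr_cons, ih, polyVal_cons]
    apply pv_mod_congr pr _ _ hpr
    obtain ⟨k, e⟩ := pv_dvd_mod_sub pr (polyVal m t)
    exact ⟨k * m, by linear_combination m * e⟩

lemma polynomial_hash_func_eq (t : List Char) (pr m : Int) (hpr : pr ≠ 0) :
    polynomial_hash_func t pr m = PySem.Int.mod (polyVal m t) pr := by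
  unfold polynomial_hash_func
  rw [PySem.List.len_eq, PySem.List.pyRange_neg_one_eq_reverse, List.foldl_reverse]
  rw [show ((-1 : Int) + 1) = 0 by ring]
  rw [show ((t.length : Int) - 1 + 1) = (t.length : Int) by ring]
  rw [show (PySem.List.pyRange 0 (t.length : Int) 1).foldr
        (fun i h => PySem.Int.mod (h * m + pvOrd (PySem.List.pyGetD t i ' ')) pr) 0
      = ((PySem.List.pyRange 0 (t.length : Int) 1).map (fun j => PySem.List.pyGetD t j ' ')).foldr
        (fun c h => PySem.Int.mod (h * m + pvOrd c) pr) 0 from (List.foldr_map (f := fun j => PySem.List.pyGetD t j ' ')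
        (g := fun c h => PySem.Int.mod (h * m + pvOrd c) pr)).symm]
  rw [PySem.List.map_pyGetD_pyRange_zero']
  exact polyA_foldr pr m hpr t

-- B's inner loop invariant
lemma pvWindowHash_inv (pr m : Int) (hpr : pr ≠ 0) :
    ∀ (t : List Char) (h pw : Int), PySem.Int.mod h pr = h →
    (t.foldl (fun st c =>
        (PySem.Int.mod (st.1 + pvOrd c * st.2) pr, PySem.Int.mod (st.2 * m) pr)) (h, pw)).1
      = PySem.Int.mod (h + pw * polyVal m t) pr := by
  intro t
  induction t with
  | nil => intro h pw hh; simpa using hh.symm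
  | cons c t ih =>
    intro h pw hh
    simp only [List.foldl_cons]
    rw [ih _ _ (pv_mod_idem pr _ hpr)]
    apply pv_mod_congr pr _ _ hpr
    obtain ⟨k1, e1⟩ := pv_dvd_mod_sub pr (h + pvOrd c * pw)
    obtain ⟨k2, e2⟩ := pv_dvd_mod_sub pr (pw * m)
    refine ⟨k1 + k2 * polyVal m t, ?_⟩
    simp only [polyVal_cons]
    linear_combination e1 + polyVal m t * e2

lemma pvWindowHash_eq (t : List Char) (pr m : Int) (hpr : pr ≠ 0) :
    pvWindowHash t pr m = PySem.Int.mod (polyVal m t) pr := by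
  unfold pvWindowHash
  rw [pvWindowHash_inv pr m hpr t 0 1 (pv_mod_zero pr hpr)]
  norm_num

-- the common key: the Python hash value of the window starting at j
def pvKey (s : List Char) (p pr m : Int) (j : Int) : Int :=
  PySem.Int.mod (polyVal m (PySem.List.slice s (some j) (some (j + p)))) pr

lemma pv_window_eq (s : List Char) (p j : Int) (hj : 0 ≤ j) (hp : 0 ≤ p) :
    PySem.List.slice s (some j) (some (j + p)) = (s.drop j.toNat).take p.toNat := by
  rw [PySem.List.slice_toNat s hj (by omega)]
  congr 1
  omega

-- the pure integer rolling identity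
lemma polyVal_window_roll (m : Int) (s : List Char) (j pn : Nat) (h : j + pn < s.length) :
    m * polyVal m ((s.drop (j + 1)).take pn) + pvOrd (s[j]'(by omega))
      - m ^ pn * pvOrd (s[j + pn]'h)
    = polyVal m ((s.drop j).take pn) := by
  cases pn with
  | zero => simp
  | succ q =>
    have hdj : s.drop j = (s[j]'(by omega)) :: s.drop (j + 1) :=
      List.drop_eq_getElem_cons (by omega)
    have hlen : q < (s.drop (j + 1)).length := by
      rw [List.length_drop]; omega
    have htake : (s.drop (j + 1)).take (q + 1)
        = (s.drop (j + 1)).take q ++ [(s.drop (j + 1))[q]'hlen] := by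
      rw [List.take_succ]
      simp [List.getElem?_eq_getElem hlen]
    have hget : (s.drop (j + 1))[q]'hlen = s[j + 1 + q]'(by omega) := by
      rw [List.getElem_drop]
    have hlenq : ((s.drop (j + 1)).take q).length = q := by
      rw [List.length_take, List.length_drop]; omega
    have hidx : s[j + (q + 1)]'h = s[j + 1 + q]'(by omega) := by
      congr 1; omega
    rw [hdj, List.take_succ_cons, polyVal_cons, htake, hget, hidx,
      polyVal_append_singleton, hlenq]
    ring

-- the rolling update produces the next window's key
lemma pv_roll_key (s : List Char) (p pr m : Int) (hpr : pr ≠ 0) (hp : 0 ≤ p)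
    (j : Int) (hj : 0 ≤ j) (hjp : j + p < (s.length : Int)) :
    PySem.Int.mod
      (m * pvKey s p pr m (j + 1) + pvOrd (PySem.List.pyGetD s j ' ')
        - pvPowMod m p.toNat pr * pvOrd (PySem.List.pyGetD s (j + p) ' ')) pr
    = pvKey s p pr m j := by
  have hjn : j.toNat + p.toNat < s.length := by omega
  rw [PySem.List.pyGetD_eq_getElem s ' ' hj (by exact_mod_cast (by omega : j < (s.length : Int)))]
  rw [PySem.List.pyGetD_eq_getElem s ' ' (by omega : (0:Int) ≤ j + p) hjp]
  unfold pvKey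
  rw [pv_window_eq s p (j + 1) (by omega) hp, pv_window_eq s p j hj hp]
  have hj1 : (j + 1).toNat = j.toNat + 1 := by omega
  rw [hj1]
  have hg : s[(j + p).toNat]'(by omega) = s[j.toNat + p.toNat]'hjn := by
    congr 1; omega
  rw [hg]
  have hroll := polyVal_window_roll m s j.toNat p.toNat hjn
  rw [pvPowMod_eq m pr hpr p.toNat]
  apply pv_mod_congr pr _ _ hpr
  obtain ⟨k1, e1⟩ := pv_dvd_mod_sub pr (polyVal m ((s.drop (j.toNat + 1)).take p.toNat))
  obtain ⟨k2, e2⟩ := pv_dvd_mod_sub pr (m ^ p.toNat)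
  refine ⟨m * k1 - k2 * pvOrd (s[j.toNat + p.toNat]'hjn), ?_⟩
  linear_combination m * e1 - pvOrd (s[j.toNat + p.toNat]'hjn) * e2 + hroll

-- A's loop, started from the right state, builds the same dict as B's key inserts
lemma pv_loop_eq (s : List Char) (p pr m : Int) (hpr : pr ≠ 0) (hp : 0 ≤ p) :
    ∀ (N : Nat), (N : Int) + p ≤ (s.length : Int) →
    ∀ (d : PySem.Dict Int Int) (last : Int), last = pvKey s p pr m (N : Int) →
    ((PySem.List.pyRange ((N : Int) - 1) (-1) (-1)).foldl
      (fun st j =>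
        (st.1.insert (PySem.Int.mod
          (m * st.2 + pvOrd (PySem.List.pyGetD s j ' ')
            - pvPowMod m p.toNat pr * pvOrd (PySem.List.pyGetD s (j + p) ' ')) pr) j,
         PySem.Int.mod
          (m * st.2 + pvOrd (PySem.List.pyGetD s j ' ')
            - pvPowMod m p.toNat pr * pvOrd (PySem.List.pyGetD s (j + p) ' ')) pr))
      (d, last)).1
    = (PySem.List.pyRange ((N : Int) - 1) (-1) (-1)).foldl
        (fun d j => d.insert (pvKey s p pr m j) j) d := by
  intro N
  induction N with
  | zero =>
    intro _ d last _
    rw [show (((0 : Nat) : Int) - 1) = (-1 : Int) by norm_num]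
    rw [PySem.List.pyRange_neg_one_eq_nil (by norm_num)]
    simp
  | succ n ih =>
    intro hN d last hlast
    rw [show (((n + 1 : Nat) : Int) - 1) = (n : Int) by push_cast; ring]
    rw [PySem.List.pyRange_neg_one_cons (by omega : (-1 : Int) < (n : Int))]
    simp only [List.foldl_cons]
    have hlast' : last = pvKey s p pr m ((n : Int) + 1) := by
      rw [hlast]; norm_cast
    have hkey : PySem.Int.mod
        (m * last + pvOrd (PySem.List.pyGetD s (n : Int) ' ')
          - pvPowMod m p.toNat pr * pvOrd (PySem.List.pyGetD s ((n : Int) + p) ' ')) pr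
        = pvKey s p pr m (n : Int) := by
      rw [hlast']
      exact pv_roll_key s p pr m hpr hp (n : Int) (by omega)
        (by push_cast at hN; omega)
    simp only [hkey]
    exact ih (by push_cast at hN ⊢; omega) _ _ rfl

-- ===== VERDICT (by name: the statement is the Claim_ definition above) =====
theorem hash_dictionary_spec : Claim_equal_hash_dictionary := by
  intro string p_len prime multiplier _ hpre
  obtain ⟨hp, hpr⟩ := hpre
  show hash_dictionary string p_len prime multiplier
      = hash_dictionary_alt string p_len prime multiplier
  simp only [hash_dictionary, hash_dictionary_alt, PySem.List.len_eq]
  set s := string.toList with hs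
  -- the first inserted key is the same hash on both sides
  have hkey0 : pvWindowHash (PySem.List.slice s (some ((s.length : Int) - p_len)) none)
        prime multiplier
      = polynomial_hash_func (PySem.List.slice s (some ((s.length : Int) - p_len)) none)
        prime multiplier := by
    rw [pvWindowHash_eq _ _ _ hpr, polynomial_hash_func_eq _ _ _ hpr]
  rw [hkey0]
  by_cases hple : p_len ≤ (s.length : Int)
  · -- p_len ≤ len: the two loops build the same dict of key inserts
    have hB : (fun (d : PySem.Dict Int Int) j =>
        d.insert (pvWindowHash (PySem.List.slice s (some j) (some (j + p_len))) prime multiplier) j)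
        = fun (d : PySem.Dict Int Int) j => d.insert (pvKey s p_len prime multiplier j) j := by
      funext d j
      rw [pvWindowHash_eq _ _ _ hpr]
      rfl
    have hlast0 : polynomial_hash_func
        (PySem.List.slice s (some ((s.length : Int) - p_len)) none) prime multiplier
        = pvKey s p_len prime multiplier ((s.length : Int) - p_len) := by
      rw [PySem.List.slice_from s (by omega : (0:Int) ≤ (s.length : Int) - p_len)]
      rw [polynomial_hash_func_eq _ _ _ hpr]
      unfold pvKey
      rw [pv_window_eq s p_len ((s.length : Int) - p_len) (by omega) hp]
      rw [List.take_of_length_le (by rw [List.length_drop]; omega)]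
    have hNc : ((((s.length : Int) - p_len).toNat : Nat) : Int) = (s.length : Int) - p_len := by
      omega
    rw [hB]
    have heq := pv_loop_eq s p_len prime multiplier hpr hp ((s.length : Int) - p_len).toNat
      (by rw [hNc]; omega)
      (((PySem.Dict.empty : PySem.Dict Int Int)).insert
        (polynomial_hash_func (PySem.List.slice s (some ((s.length : Int) - p_len)) none)
          prime multiplier) ((s.length : Int) - p_len))
      (polynomial_hash_func (PySem.List.slice s (some ((s.length : Int) - p_len)) none)
        prime multiplier)
      (by rw [hNc, hlast0])
    rw [hNc] at heq
    rw [heq]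
  · -- p_len > len: both loop ranges are empty; the single inserts coincide
    push_neg at hple
    rw [PySem.List.pyRange_neg_one_eq_nil (by omega : (s.length : Int) - p_len - 1 ≤ -1)]
    simp only [List.foldl_nil]
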